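-- pv_equiv track=rewrite | github.com/JoshuaCavanagh53/COMP3000-Autocorrel8 | autocorrel8Main/app/registryTimeline.py | _compute_group_positions
-- ===== SOURCE A (Python) =====
-- LABEL_WIDTH   = 110
--
-- DOT_SPACING   = 22
--
-- GROUP_PADDING = 40
--
-- def _compute_group_positions(entries: list[dict]) -> dict:
--     key_paths = list(dict.fromkeys(e.get("key_path", "") for e in entries))
--     positions = {}
--     x = LABEL_WIDTH + GROUP_PADDING
--
--     for kp in key_paths:
--         positions[kp] = x
--         kp_entries   = [e for e in entries if e.get("key_path") == kp]
--         baseline_n   = sum(1 for e in kp_entries if e.get("change_type") in ("deleted",  "modified"))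
--         snapshot_n   = sum(1 for e in kp_entries if e.get("change_type") in ("added",    "modified"))
--         max_dots     = max(baseline_n, snapshot_n, 1)
--         x           += max_dots * DOT_SPACING + GROUP_PADDING
--
--     return positions
-- ===== SOURCE B (Python) =====
-- LABEL_WIDTH   = 110
-- DOT_SPACING   = 22
-- GROUP_PADDING = 40
--
-- def _compute_group_positions(entries: list[dict]) -> dict:
--     # One counting pass into a dict, then one cumulative-x pass (no per-key rescan).
--     counts = {}
--     for e in entries:
--         kp = e.get("key_path")
--         b, s = counts.get(kp, (0, 0))
--         ct = e.get("change_type")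
--         counts[kp] = (b + (ct in ("deleted", "modified")),
--                       s + (ct in ("added", "modified")))
--     positions = {}
--     x = LABEL_WIDTH + GROUP_PADDING
--     for kp in dict.fromkeys(e.get("key_path", "") for e in entries):
--         b, s = counts.get(kp, (0, 0))
--         positions[kp] = x
--         x += max(b, s, 1) * DOT_SPACING + GROUP_PADDING
--     return positions
-- ===== Notes on version B (the rewrite author's own statement) =====
-- stated objective: alternative
-- what changed: Replaced A's per-key_path rescan of all entries (a filtered list and two counted scans per key) with a single counting pass that accumulates (baseline, snapshot) counts per key_path in a dict, followed by one cumulative-x pass over the deduplicated key order; this trades A's nested scans for one extra dict.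
import Mathlib
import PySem

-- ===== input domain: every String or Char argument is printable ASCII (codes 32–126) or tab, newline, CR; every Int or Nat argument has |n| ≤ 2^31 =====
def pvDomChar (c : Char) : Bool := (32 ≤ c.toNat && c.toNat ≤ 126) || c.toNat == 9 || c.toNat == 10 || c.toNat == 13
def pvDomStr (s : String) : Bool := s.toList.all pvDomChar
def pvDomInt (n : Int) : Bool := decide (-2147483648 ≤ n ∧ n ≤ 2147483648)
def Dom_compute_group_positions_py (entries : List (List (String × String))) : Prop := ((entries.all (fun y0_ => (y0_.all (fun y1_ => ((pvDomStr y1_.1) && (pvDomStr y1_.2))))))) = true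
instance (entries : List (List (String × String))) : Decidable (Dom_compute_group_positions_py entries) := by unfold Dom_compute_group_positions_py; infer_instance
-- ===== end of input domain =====

-- B replaces A's per-key rescan of all entries by one counting pass into a dict
-- followed by one cumulative-x pass (objective: alternative single-pass algorithm).


-- ===== PORT A =====
-- predicate of A's `e.get("change_type") in ("deleted", "modified")`
def pvIsBase (e : List (String × String)) : Bool :=
  let ct := (PySem.Dict.mk e).get? "change_type"
  ct == some "deleted" || ct == some "modified"

-- predicate of A's `e.get("change_type") in ("added", "modified")`
def pvIsSnap (e : List (String × String)) : Bool :=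
  let ct := (PySem.Dict.mk e).get? "change_type"
  ct == some "added" || ct == some "modified"

def compute_group_positions_py (entries : List (List (String × String))) : List (String × Int) :=
  let key_paths := PySem.List.dedup (entries.map (fun e => (PySem.Dict.mk e).getD "key_path" ""))
  let res := key_paths.foldl
    (fun (st : PySem.Dict String Int × Int) kp =>
      let positions := st.1.insert kp st.2
      let kp_entries := entries.filter (fun e => (PySem.Dict.mk e).get? "key_path" == some kp)
      let baseline_n : Int := kp_entries.countP pvIsBase
      let snapshot_n : Int := kp_entries.countP pvIsSnap
      let max_dots := max (max baseline_n snapshot_n) 1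
      (positions, st.2 + max_dots * 22 + 40))
    (PySem.Dict.empty, (110 + 40 : Int))
  res.1.items

-- ===== PORT B =====
-- one counting step of B's first loop: counts[e.get("key_path")] += (base?, snap?)
def pvCountStep (d : PySem.Dict (Option String) (Int × Int)) (e : List (String × String)) :
    PySem.Dict (Option String) (Int × Int) :=
  let kp := (PySem.Dict.mk e).get? "key_path"
  let bs := d.getD kp (0, 0)
  let ct := (PySem.Dict.mk e).get? "change_type"
  d.insert kp (bs.1 + (if ct == some "deleted" || ct == some "modified" then 1 else 0),
               bs.2 + (if ct == some "added" || ct == some "modified" then 1 else 0))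

def compute_group_positions_py_alt (entries : List (List (String × String))) : List (String × Int) :=
  let counts := entries.foldl pvCountStep PySem.Dict.empty
  let order := PySem.List.dedup (entries.map (fun e => (PySem.Dict.mk e).getD "key_path" ""))
  let res := order.foldl
    (fun (st : PySem.Dict String Int × Int) kp =>
      let bs := counts.getD (some kp) (0, 0)
      (st.1.insert kp st.2, st.2 + max (max bs.1 bs.2) 1 * 22 + 40))
    (PySem.Dict.empty, (110 + 40 : Int))
  res.1.items

-- ===== PRECONDITION & SPEC =====
def Spec_compute_group_positions_py (entries : List (List (String × String))) (out : List (String × Int)) : Prop := out = compute_group_positions_py_alt entries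
instance (entries : List (List (String × String))) (out : List (String × Int)) : Decidable (Spec_compute_group_positions_py entries out) := by unfold Spec_compute_group_positions_py; infer_instance

-- ===== CLAIM (what is proved, stated in full; the proofs are below) =====
def Claim_equal_compute_group_positions_py : Prop := ∀ (entries : List (List (String × String))), Dom_compute_group_positions_py entries → Spec_compute_group_positions_py entries (compute_group_positions_py entries)

-- ===== LEMMAS AND PROOFS =====

-- B's counting dict at key k holds exactly A's two filtered counts
theorem pv_counts_getD (l : List (List (String × String)))
    (d : PySem.Dict (Option String) (Int × Int)) (k : Option String) :
    (l.foldl pvCountStep d).getD k (0,0) =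
      ((d.getD k (0,0)).1 + ((l.filter (fun e => (PySem.Dict.mk e).get? "key_path" == k)).countP pvIsBase : Int),
       (d.getD k (0,0)).2 + ((l.filter (fun e => (PySem.Dict.mk e).get? "key_path" == k)).countP pvIsSnap : Int)) := by
  induction l generalizing d with
  | nil => simp
  | cons e l ih =>
    simp only [List.foldl_cons, ih, List.filter_cons]
    by_cases h : (PySem.Dict.mk e).get? "key_path" = k
    · simp [pvCountStep, pvIsBase, pvIsSnap, h, List.countP_cons]
      split_ifs <;> constructor <;> ring
    · have hne : ((PySem.Dict.mk e).get? "key_path" == k) = false := by simp [h]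
      simp [pvCountStep, hne, PySem.Dict.getD_insert, Ne.symm h]

-- ===== VERDICT (by name: the statement is the Claim_ definition above) =====
theorem compute_group_positions_py_spec : Claim_equal_compute_group_positions_py := by
  intro entries _
  unfold Spec_compute_group_positions_py compute_group_positions_py compute_group_positions_py_alt
  have hstep : (fun (st : PySem.Dict String Int × Int) kp =>
      let positions := st.1.insert kp st.2
      let kp_entries := entries.filter (fun e => (PySem.Dict.mk e).get? "key_path" == some kp)
      let baseline_n : Int := kp_entries.countP pvIsBase
      let snapshot_n : Int := kp_entries.countP pvIsSnap
      let max_dots := max (max baseline_n snapshot_n) 1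
      ((positions, st.2 + max_dots * 22 + 40) : PySem.Dict String Int × Int))
    = (fun (st : PySem.Dict String Int × Int) kp =>
      let bs := (entries.foldl pvCountStep PySem.Dict.empty).getD (some kp) (0, 0)
      (st.1.insert kp st.2, st.2 + max (max bs.1 bs.2) 1 * 22 + 40)) := by
    funext st kp
    simp [pv_counts_getD entries PySem.Dict.empty (some kp)]
  rw [hstep]
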